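-- pv_equiv track=rewrite | github.com/Welonbai/SR-GNN-robustness | attack/data/unified_split.py | _map_sessions
-- ===== SOURCE A (Python) =====
-- def _map_sessions(
--     session_ids: list[str],
--     sessions: dict[str, list[str]],
--     item_map: dict[str, int] | None = None,
-- ) -> tuple[list[list[int]], dict[str, int]]:
--     mapping = item_map or {}
--     next_id = max(mapping.values(), default=0) + 1
--     mapped_sessions: list[list[int]] = []
--     for sid in session_ids:
--         mapped_seq = []
--         for item in sessions[sid]:
--             if item in mapping:
--                 mapped_seq.append(mapping[item])
--             elif item_map is None:
--                 mapping[item] = next_id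
--                 mapped_seq.append(next_id)
--                 next_id += 1
--         if len(mapped_seq) >= 2:
--             mapped_sessions.append(mapped_seq)
--     return mapped_sessions, mapping
-- ===== SOURCE B (Python) =====
-- def _map_sessions(
--     session_ids: list[str],
--     sessions: dict[str, list[str]],
--     item_map: dict[str, int] | None = None,
-- ) -> tuple[list[list[int]], dict[str, int]]:
--     # Pass 1: the complete item->id mapping (built by first appearance iff none was given).
--     if item_map is None:
--         mapping = {}
--         next_id = 1
--         for sid in session_ids:
--             for item in sessions[sid]:
--                 if item not in mapping:
--                     mapping[item] = next_id
--                     next_id += 1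
--     else:
--         mapping = item_map or {}
--     # Pass 2: map every session through the finished mapping, keep sessions of length >= 2.
--     mapped_sessions = []
--     for sid in session_ids:
--         mapped_seq = [mapping[item] for item in sessions[sid] if item in mapping]
--         if len(mapped_seq) >= 2:
--             mapped_sessions.append(mapped_seq)
--     return mapped_sessions, mapping
-- ===== Notes on version B (the rewrite author's own statement) =====
-- stated objective: alternative
-- what changed: Replaces A's single interleaved loop (which builds the item->id mapping while emitting mapped sessions) by two separate passes: a first pass that only builds the complete mapping (when none is given), and a second pass that maps every session by pure lookup in the finished mapping.
import Mathlib
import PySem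

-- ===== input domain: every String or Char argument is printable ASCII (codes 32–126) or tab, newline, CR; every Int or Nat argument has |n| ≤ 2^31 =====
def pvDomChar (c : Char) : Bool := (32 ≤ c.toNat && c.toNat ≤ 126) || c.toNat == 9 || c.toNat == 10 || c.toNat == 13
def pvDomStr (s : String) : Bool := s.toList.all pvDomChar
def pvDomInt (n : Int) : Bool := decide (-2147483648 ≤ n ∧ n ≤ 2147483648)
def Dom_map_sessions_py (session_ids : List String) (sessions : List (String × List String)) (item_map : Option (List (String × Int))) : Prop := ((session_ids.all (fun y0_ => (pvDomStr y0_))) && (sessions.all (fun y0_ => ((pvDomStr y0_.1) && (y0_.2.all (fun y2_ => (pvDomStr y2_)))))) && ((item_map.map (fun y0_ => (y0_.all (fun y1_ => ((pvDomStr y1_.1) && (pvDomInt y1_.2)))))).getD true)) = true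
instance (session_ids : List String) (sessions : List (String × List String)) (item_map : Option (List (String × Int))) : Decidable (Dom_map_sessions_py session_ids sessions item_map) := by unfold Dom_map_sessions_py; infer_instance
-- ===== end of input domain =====

-- B replaces A's single interleaved loop by two passes (build the full mapping, then map sessions
-- by pure lookup); same cost, different decomposition. Return-value equivalence only (A mutates the
-- dict it created itself; a caller-supplied non-empty item_map is returned unmodified by both).

-- ===== PORT A =====
-- inner loop body: 'for item in sessions[sid]: …' over state (mapped_seq, mapping, next_id)
def aInner (item_map : Option (List (String × Int)))
    (st : List Int × PySem.Dict String Int × Int) (item : String) :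
    List Int × PySem.Dict String Int × Int :=
  let (seq, m, nid) := st
  if m.contains item then (seq ++ [m.getD item 0], m, nid)
  else match item_map with
    | none => (seq ++ [nid], m.insert item nid, nid + 1)
    | some _ => (seq, m, nid)

-- outer loop body: 'for sid in session_ids: …' over state (mapped_sessions, mapping, next_id)
def aOuter (sdict : PySem.Dict String (List String)) (item_map : Option (List (String × Int)))
    (st : List (List Int) × PySem.Dict String Int × Int) (sid : String) :
    List (List Int) × PySem.Dict String Int × Int :=
  let (out, m, nid) := st
  let r := (sdict.getD sid []).foldl (aInner item_map) ([], m, nid)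
  (if 2 ≤ r.1.length then out ++ [r.1] else out, r.2.1, r.2.2)

def map_sessions_py (session_ids : List String) (sessions : List (String × List String)) (item_map : Option (List (String × Int))) : List (List Int) × (List (String × Int)) :=
  -- mapping = item_map or {}
  let mapping : PySem.Dict String Int :=
    match item_map with
    | some l => if l.isEmpty then PySem.Dict.empty else PySem.Dict.mk l
    | none => PySem.Dict.empty
  -- next_id = max(mapping.values(), default=0) + 1
  let next_id : Int := PySem.List.maxD mapping.values id 0 + 1
  let r := session_ids.foldl (aOuter (PySem.Dict.mk sessions) item_map) ([], mapping, next_id)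
  (r.1, r.2.1.items)

-- ===== PORT B =====
-- pass-1 inner body: assign a fresh id on first appearance
def bBuildItem (st : PySem.Dict String Int × Int) (item : String) : PySem.Dict String Int × Int :=
  if st.1.contains item then st else (st.1.insert item st.2, st.2 + 1)

def bBuild (sdict : PySem.Dict String (List String))
    (st : PySem.Dict String Int × Int) (sid : String) : PySem.Dict String Int × Int :=
  (sdict.getD sid []).foldl bBuildItem st

-- pass-2 body: mapped_seq = [mapping[item] for item in sessions[sid] if item in mapping]
def bCollect (sdict : PySem.Dict String (List String)) (m : PySem.Dict String Int)
    (out : List (List Int)) (sid : String) : List (List Int) :=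
  let seq := (sdict.getD sid []).filterMap (fun it => m.get? it)
  if 2 ≤ seq.length then out ++ [seq] else out

def map_sessions_py_alt (session_ids : List String) (sessions : List (String × List String)) (item_map : Option (List (String × Int))) : List (List Int) × (List (String × Int)) :=
  let sdict := PySem.Dict.mk sessions
  let mapping : PySem.Dict String Int :=
    match item_map with
    | none => (session_ids.foldl (bBuild sdict) (PySem.Dict.empty, 1)).1
    | some l => if l.isEmpty then PySem.Dict.empty else PySem.Dict.mk l
  (session_ids.foldl (bCollect sdict mapping) [], mapping.items)

-- ===== PRECONDITION & SPEC =====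
-- Pre_ excludes exactly the inputs where Python's 'sessions[sid]' raises KeyError: every listed
-- session id must be a key of sessions.
def Pre_map_sessions_py (session_ids : List String) (sessions : List (String × List String)) (item_map : Option (List (String × Int))) : Prop :=
  ∀ sid ∈ session_ids, sid ∈ sessions.map Prod.fst
instance (session_ids : List String) (sessions : List (String × List String)) (item_map : Option (List (String × Int))) : Decidable (Pre_map_sessions_py session_ids sessions item_map) := by unfold Pre_map_sessions_py; infer_instance

def pvWitness_map_sessions_py : List String × (List (String × List String)) × (Option (List (String × Int))) :=
  (["s1", "s2"], [("s1", ["a", "b"]), ("s2", ["b", "c", "a"])], none)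

def Spec_map_sessions_py (session_ids : List String) (sessions : List (String × List String)) (item_map : Option (List (String × Int))) (out : List (List Int) × (List (String × Int))) : Prop := out = map_sessions_py_alt session_ids sessions item_map
instance (session_ids : List String) (sessions : List (String × List String)) (item_map : Option (List (String × Int))) (out : List (List Int) × (List (String × Int))) : Decidable (Spec_map_sessions_py session_ids sessions item_map out) := by unfold Spec_map_sessions_py; infer_instance

-- ===== CLAIM (what is proved, stated in full; the proofs are below) =====
def Claim_equal_map_sessions_py : Prop := ∀ (session_ids : List String) (sessions : List (String × List String)) (item_map : Option (List (String × Int))), Dom_map_sessions_py session_ids sessions item_map → Pre_map_sessions_py session_ids sessions item_map → Spec_map_sessions_py session_ids sessions item_map (map_sessions_py session_ids sessions item_map)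

-- ===== LEMMAS AND PROOFS =====

-- L1: the build item-loop preserves existing bindings
theorem build_item_mono (l : List String) (m : PySem.Dict String Int) (nid : Int)
    (k : String) (v : Int) (h : m.get? k = some v) :
    ((l.foldl bBuildItem (m, nid)).1).get? k = some v := by
  induction l generalizing m nid with
  | nil => simpa using h
  | cons it tl ih =>
    simp only [List.foldl_cons]
    by_cases hc : m.contains it = true
    · simp only [bBuildItem, hc, if_pos]
      exact ih m nid h
    · rw [show bBuildItem (m, nid) it = (m.insert it nid, nid + 1) by simp [bBuildItem, hc]]
      apply ih
      have hne : it ≠ k := by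
        intro he
        subst he
        rw [PySem.Dict.contains_eq_isSome_get?, h] at hc
        simp at hc
      rw [PySem.Dict.get?_insert_of_ne m nid (Ne.symm hne)]
      exact h

-- L2: the build session-loop preserves existing bindings
theorem build_mono (sdict : PySem.Dict String (List String)) (sids : List String)
    (m : PySem.Dict String Int) (nid : Int) (k : String) (v : Int) (h : m.get? k = some v) :
    ((sids.foldl (bBuild sdict) (m, nid)).1).get? k = some v := by
  induction sids generalizing m nid with
  | nil => simpa using h
  | cons sid tl ih =>
    simp only [List.foldl_cons, bBuild]
    exact ih _ _ (build_item_mono (sdict.getD sid []) m nid k v h)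

-- L3: after the build item-loop, every item of the list is bound
theorem build_item_mem (l : List String) (m : PySem.Dict String Int) (nid : Int)
    (it : String) (h : it ∈ l) :
    (((l.foldl bBuildItem (m, nid)).1).get? it).isSome := by
  induction l generalizing m nid with
  | nil => cases h
  | cons x tl ih =>
    simp only [List.foldl_cons]
    rcases List.mem_cons.mp h with he | ht
    · subst he
      by_cases hc : m.contains it = true
      · simp only [bBuildItem, hc, if_pos]
        rw [PySem.Dict.contains_eq_isSome_get?] at hc
        obtain ⟨v, hv⟩ := Option.isSome_iff_exists.mp hc
        rw [build_item_mono tl m nid it v hv]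
        rfl
      · rw [show bBuildItem (m, nid) it = (m.insert it nid, nid + 1) by simp [bBuildItem, hc]]
        rw [build_item_mono tl _ _ it nid (PySem.Dict.get?_insert_self m it nid)]
        rfl
    · by_cases hc : m.contains x = true
      · simp only [bBuildItem, hc, if_pos]
        exact ih m nid ht
      · rw [show bBuildItem (m, nid) x = (m.insert x nid, nid + 1) by simp [bBuildItem, hc]]
        exact ih _ _ ht

-- L4: A's inner loop (item_map = None) = mapping each item by the post-build lookup
theorem inner_none_eq (l : List String) (seq : List Int) (m : PySem.Dict String Int) (nid : Int) :
    l.foldl (aInner none) (seq, m, nid) =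
      (seq ++ l.map (fun it => ((l.foldl bBuildItem (m, nid)).1).getD it 0),
       (l.foldl bBuildItem (m, nid)).1, (l.foldl bBuildItem (m, nid)).2) := by
  induction l generalizing seq m nid with
  | nil => simp
  | cons it tl ih =>
    simp only [List.foldl_cons, List.map_cons]
    by_cases hc : m.contains it = true
    · have hb : bBuildItem (m, nid) it = (m, nid) := by simp [bBuildItem, hc]
      have ha : aInner none (seq, m, nid) it = (seq ++ [m.getD it 0], m, nid) := by
        simp [aInner, hc]
      rw [hb, ha, ih]
      rw [PySem.Dict.contains_eq_isSome_get?] at hc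
      obtain ⟨v, hv⟩ := Option.isSome_iff_exists.mp hc
      have hfin := build_item_mono tl m nid it v hv
      have : ((tl.foldl bBuildItem (m, nid)).1).getD it 0 = m.getD it 0 := by
        rw [PySem.Dict.getD_eq_get?_getD, PySem.Dict.getD_eq_get?_getD, hfin, hv]
      rw [this]
      simp
    · have hb : bBuildItem (m, nid) it = (m.insert it nid, nid + 1) := by
        simp [bBuildItem, hc]
      have ha : aInner none (seq, m, nid) it = (seq ++ [nid], m.insert it nid, nid + 1) := by
        simp [aInner, hc]
      rw [hb, ha, ih]
      have hfin := build_item_mono tl (m.insert it nid) (nid + 1) it nid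
        (PySem.Dict.get?_insert_self m it nid)
      have : ((tl.foldl bBuildItem (m.insert it nid, nid + 1)).1).getD it 0 = nid := by
        rw [PySem.Dict.getD_eq_get?_getD, hfin]; rfl
      rw [this]
      simp

-- L5: filterMap get? = map getD when every element is bound
theorem filterMap_eq_map_getD (l : List String) (M : PySem.Dict String Int)
    (h : ∀ it ∈ l, ((M.get? it)).isSome) :
    l.filterMap (fun it => M.get? it) = l.map (fun it => M.getD it 0) := by
  induction l with
  | nil => rfl
  | cons x tl ih =>
    have hx := h x (List.mem_cons_self)
    obtain ⟨v, hv⟩ := Option.isSome_iff_exists.mp hx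
    simp only [List.filterMap_cons, List.map_cons, hv]
    rw [ih (fun it hit => h it (List.mem_cons_of_mem _ hit))]
    rw [PySem.Dict.getD_eq_get?_getD, hv]
    rfl

-- L6: A's outer loop (item_map = None) = build pass then collect pass with the final mapping
theorem outer_none_eq (sdict : PySem.Dict String (List String)) (sids : List String)
    (out : List (List Int)) (m : PySem.Dict String Int) (nid : Int) :
    sids.foldl (aOuter sdict none) (out, m, nid) =
      (sids.foldl (bCollect sdict ((sids.foldl (bBuild sdict) (m, nid)).1)) out,
       (sids.foldl (bBuild sdict) (m, nid)).1, (sids.foldl (bBuild sdict) (m, nid)).2) := by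
  induction sids generalizing out m nid with
  | nil => simp
  | cons sid rest ih =>
    simp only [List.foldl_cons]
    set items := sdict.getD sid [] with hitems
    have ha : aOuter sdict none (out, m, nid) sid =
        (if 2 ≤ (items.map (fun it => ((items.foldl bBuildItem (m, nid)).1).getD it 0)).length
         then out ++ [items.map (fun it => ((items.foldl bBuildItem (m, nid)).1).getD it 0)]
         else out,
         (items.foldl bBuildItem (m, nid)).1, (items.foldl bBuildItem (m, nid)).2) := by
      simp only [aOuter, ← hitems]
      rw [inner_none_eq items [] m nid]
      simp
    have hbb : bBuild sdict (m, nid) sid = items.foldl bBuildItem (m, nid) := rfl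
    rcases h1 : items.foldl bBuildItem (m, nid) with ⟨m1, n1⟩
    rw [ha, hbb, h1, ih]
    -- the collected sequence for sid computed with the FINAL mapping equals A's sequence
    set M := (rest.foldl (bBuild sdict) (m1, n1)).1 with hM
    have hsome : ∀ it ∈ items, (M.get? it).isSome := by
      intro it hit
      have h3 := build_item_mem items m nid it hit
      rw [h1] at h3
      obtain ⟨v, hv⟩ := Option.isSome_iff_exists.mp h3
      rw [hM, build_mono sdict rest m1 n1 it v hv]
      rfl
    have hvals : ∀ it ∈ items, M.getD it 0 = m1.getD it 0 := by
      intro it hit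
      have h3 := build_item_mem items m nid it hit
      rw [h1] at h3
      obtain ⟨v, hv⟩ := Option.isSome_iff_exists.mp h3
      rw [PySem.Dict.getD_eq_get?_getD, PySem.Dict.getD_eq_get?_getD, hv,
        build_mono sdict rest m1 n1 it v hv]
    have hseq : items.filterMap (fun it => M.get? it) =
        items.map (fun it => m1.getD it 0) := by
      rw [filterMap_eq_map_getD items M hsome]
      exact List.map_congr_left hvals
    have hcol : bCollect sdict M out sid =
        (if 2 ≤ (items.map (fun it => m1.getD it 0)).length
         then out ++ [items.map (fun it => m1.getD it 0)] else out) := by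
      simp only [bCollect, ← hitems, hseq]
    rw [hcol]

-- L7: A's inner loop with a provided mapping never changes it; the sequence is filterMap get?
theorem inner_some_eq (l₀ : List (String × Int)) (l : List String) (seq : List Int)
    (m : PySem.Dict String Int) (nid : Int) :
    l.foldl (aInner (some l₀)) (seq, m, nid) =
      (seq ++ l.filterMap (fun it => m.get? it), m, nid) := by
  induction l generalizing seq with
  | nil => simp
  | cons it tl ih =>
    simp only [List.foldl_cons, List.filterMap_cons]
    by_cases hc : m.contains it = true
    · have ha : aInner (some l₀) (seq, m, nid) it = (seq ++ [m.getD it 0], m, nid) := by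
        simp [aInner, hc]
      rw [ha, ih]
      rw [PySem.Dict.contains_eq_isSome_get?] at hc
      obtain ⟨v, hv⟩ := Option.isSome_iff_exists.mp hc
      rw [hv, PySem.Dict.getD_eq_get?_getD, hv]
      simp
    · have ha : aInner (some l₀) (seq, m, nid) it = (seq, m, nid) := by
        simp [aInner, hc]
      have hn : m.get? it = none := by
        rw [PySem.Dict.contains_eq_isSome_get?] at hc
        cases h : m.get? it with
        | none => rfl
        | some v => rw [h] at hc; simp at hc
      rw [ha, ih, hn]
  
-- L8: A's outer loop with a provided mapping = the collect pass alone
theorem outer_some_eq (sdict : PySem.Dict String (List String)) (l₀ : List (String × Int))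
    (sids : List String) (out : List (List Int)) (m : PySem.Dict String Int) (nid : Int) :
    sids.foldl (aOuter sdict (some l₀)) (out, m, nid) =
      (sids.foldl (bCollect sdict m) out, m, nid) := by
  induction sids generalizing out with
  | nil => rfl
  | cons sid rest ih =>
    simp only [List.foldl_cons]
    have ha : aOuter sdict (some l₀) (out, m, nid) sid = (bCollect sdict m out sid, m, nid) := by
      simp only [aOuter, bCollect]
      rw [inner_some_eq l₀ _ [] m nid]
      simp
    rw [ha, ih]

-- ===== VERDICT (by name: the statement is the Claim_ definition above) =====
theorem map_sessions_py_spec : Claim_equal_map_sessions_py := by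
  intro session_ids sessions item_map _hdom _hpre
  unfold Spec_map_sessions_py map_sessions_py map_sessions_py_alt
  cases item_map with
  | none =>
    simp only
    rw [outer_none_eq (PySem.Dict.mk sessions) session_ids [] PySem.Dict.empty
      (PySem.List.maxD (PySem.Dict.values PySem.Dict.empty) id 0 + 1)]
    have h1 : PySem.List.maxD (PySem.Dict.values (PySem.Dict.empty : PySem.Dict String Int)) id 0 + 1 = 1 := by decide
    rw [h1]
  | some l =>
    simp only
    rw [outer_some_eq (PySem.Dict.mk sessions) l session_ids []]
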